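-- pv_equiv track=rewrite | github.com/SteveWillowby/Order_and_Chaos | old_code/plot_some_graph_structure.py | __triangles_sequence__
-- ===== SOURCE A (Python) =====
-- def __triangles_sequence__(sequence_length):
--     sequence = []
--     nodes_list = []
--     edges_list = []
--     for i in range(0, sequence_length):
--         nodes_list.append(i*3)
--         nodes_list.append(i*3 + 1)
--         nodes_list.append(i*3 + 2)
--         edges_list.append((i*3, i*3 + 1))
--         edges_list.append((i*3 + 1, i*3 + 2))
--         edges_list.append((i*3 + 2, i*3))
--         sequence.append((list(nodes_list), list(edges_list)))
--     return sequence
-- ===== SOURCE B (Python) =====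
-- def __triangles_sequence__(sequence_length):
--     def snapshot(i):
--         m = 3 * (i + 1)
--         nodes = list(range(m))
--         edges = [(v, v + 1 if v % 3 != 2 else v - 2) for v in range(m)]
--         return (nodes, edges)
--     return [snapshot(i) for i in range(sequence_length)]
-- ===== Notes on version B (the rewrite author's own statement) =====
-- stated objective: alternative
-- what changed: A maintains growing node/edge accumulators and copies them at every step; B keeps no shared state and computes each snapshot i independently in closed form: nodes = range(3*(i+1)) and each edge derived from its source vertex v by a mod-3 formula (v -> v+1, or v -> v-2 when v%3==2).
import Mathlib
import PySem

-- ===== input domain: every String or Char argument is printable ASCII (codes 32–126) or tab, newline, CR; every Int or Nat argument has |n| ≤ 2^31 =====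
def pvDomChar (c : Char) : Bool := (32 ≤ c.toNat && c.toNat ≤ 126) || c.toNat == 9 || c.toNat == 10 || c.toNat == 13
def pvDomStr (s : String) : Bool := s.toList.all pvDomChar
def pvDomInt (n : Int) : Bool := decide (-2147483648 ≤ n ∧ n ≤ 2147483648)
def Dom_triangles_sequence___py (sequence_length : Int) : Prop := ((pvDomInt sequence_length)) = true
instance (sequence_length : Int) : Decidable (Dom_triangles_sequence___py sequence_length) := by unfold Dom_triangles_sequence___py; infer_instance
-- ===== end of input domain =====

-- B replaces A's accumulate-and-copy loop by stateless per-snapshot construction: nodes are range(3*(i+1)) and edges come from a per-vertex mod-3 formula.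

-- ===== PORT A =====
-- state: (sequence, nodes_list, edges_list), appended to exactly as A's loop body does
def triangles_sequence___py (sequence_length : Int) : List (List Int × (List (Int × Int))) :=
  ((PySem.List.pyRange 0 sequence_length 1).foldl
    (fun st i =>
      let nodes := st.2.1 ++ [i*3, i*3 + 1, i*3 + 2]
      let edges := st.2.2 ++ [(i*3, i*3 + 1), (i*3 + 1, i*3 + 2), (i*3 + 2, i*3)]
      (st.1 ++ [(nodes, edges)], nodes, edges))
    (([] : List (List Int × (List (Int × Int)))), ([] : List Int), ([] : List (Int × Int)))).1

-- ===== PORT B =====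
-- Source B's snapshot(i): nodes = list(range(3*(i+1))); edges from each source vertex v by the mod-3 rule
def pvSnapshot (i : Int) : List Int × List (Int × Int) :=
  let m := 3 * (i + 1)
  let nodes := PySem.List.pyRange 0 m 1
  let edges := (PySem.List.pyRange 0 m 1).map
    (fun v => (v, if PySem.Int.mod v 3 ≠ 2 then v + 1 else v - 2))
  (nodes, edges)

def triangles_sequence___py_alt (sequence_length : Int) : List (List Int × (List (Int × Int))) :=
  (PySem.List.pyRange 0 sequence_length 1).map pvSnapshot

-- ===== PRECONDITION & SPEC =====
def Spec_triangles_sequence___py (sequence_length : Int) (out : List (List Int × (List (Int × Int)))) : Prop := out = triangles_sequence___py_alt sequence_length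
instance (sequence_length : Int) (out : List (List Int × (List (Int × Int)))) : Decidable (Spec_triangles_sequence___py sequence_length out) := by unfold Spec_triangles_sequence___py; infer_instance

-- ===== CLAIM (what is proved, stated in full; the proofs are below) =====
def Claim_equal_triangles_sequence___py : Prop := ∀ (sequence_length : Int), Dom_triangles_sequence___py sequence_length → Spec_triangles_sequence___py sequence_length (triangles_sequence___py sequence_length)

-- ===== LEMMAS AND PROOFS =====

def pvStep : (List (List Int × (List (Int × Int))) × List Int × List (Int × Int)) → Int →
    (List (List Int × (List (Int × Int))) × List Int × List (Int × Int)) :=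
  fun st i =>
    let nodes := st.2.1 ++ [i*3, i*3 + 1, i*3 + 2]
    let edges := st.2.2 ++ [(i*3, i*3 + 1), (i*3 + 1, i*3 + 2), (i*3 + 2, i*3)]
    (st.1 ++ [(nodes, edges)], nodes, edges)

def pvNodes (m : Nat) : List Int :=
  (List.range m).flatMap (fun k => [3*(k:Int), 3*(k:Int) + 1, 3*(k:Int) + 2])

def pvEdges (m : Nat) : List (Int × Int) :=
  (List.range m).flatMap (fun k =>
    [(3*(k:Int), 3*(k:Int) + 1), (3*(k:Int) + 1, 3*(k:Int) + 2), (3*(k:Int) + 2, 3*(k:Int))])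

def pvSeq (m : Nat) : List (List Int × (List (Int × Int))) :=
  (List.range m).map (fun k => (pvNodes (k+1), pvEdges (k+1)))

lemma pvNodes_succ (m : Nat) :
    pvNodes (m+1) = pvNodes m ++ [3*(m:Int), 3*(m:Int) + 1, 3*(m:Int) + 2] := by
  simp [pvNodes, List.range_succ]

lemma pvEdges_succ (m : Nat) :
    pvEdges (m+1) = pvEdges m ++
      [(3*(m:Int), 3*(m:Int) + 1), (3*(m:Int) + 1, 3*(m:Int) + 2), (3*(m:Int) + 2, 3*(m:Int))] := by
  simp [pvEdges, List.range_succ]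

lemma foldlA (m : Nat) :
    ((PySem.List.pyRange 0 (m : Int) 1).foldl pvStep ([], [], [])) =
      (pvSeq m, pvNodes m, pvEdges m) := by
  induction m with
  | zero => simp [PySem.List.pyRange_one_eq_nil, pvSeq, pvNodes, pvEdges]
  | succ m ih =>
    rw [show ((m + 1 : Nat) : Int) = (m : Int) + 1 by push_cast; ring,
      PySem.List.pyRange_one_succ_right (by positivity), List.foldl_append, ih]
    simp only [List.foldl_cons, List.foldl_nil, pvStep]
    rw [pvNodes_succ, pvEdges_succ]
    refine Prod.ext ?_ (Prod.ext (by ring_nf) (by ring_nf))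
    simp only [pvSeq, List.range_succ, List.map_append, List.map_cons, List.map_nil]
    rw [pvNodes_succ, pvEdges_succ, mul_comm (3 : Int)]

lemma snapNodes (m : Nat) : PySem.List.pyRange 0 (3 * (m : Int)) 1 = pvNodes m := by
  induction m with
  | zero => simp [PySem.List.pyRange_one_eq_nil, pvNodes]
  | succ m ih =>
    have h1 : 3 * ((m : Int) + 1) = (3 * (m : Int) + 1 + 1) + 1 := by ring
    push_cast [h1]
    rw [PySem.List.pyRange_one_succ_right (by positivity),
      PySem.List.pyRange_one_succ_right (by positivity),
      PySem.List.pyRange_one_succ_right (by positivity), ih, pvNodes_succ]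
    simp
    omega

lemma pvModThree (v : Int) (h : 0 ≤ v) : PySem.Int.mod v 3 = v % 3 :=
  PySem.Int.mod_eq_emod_of_pos (by norm_num)

lemma snapEdges (m : Nat) :
    (PySem.List.pyRange 0 (3 * (m : Int)) 1).map
      (fun v => (v, if PySem.Int.mod v 3 ≠ 2 then v + 1 else v - 2)) = pvEdges m := by
  induction m with
  | zero => simp [PySem.List.pyRange_one_eq_nil, pvEdges]
  | succ m ih =>
    have h1 : 3 * ((m : Int) + 1) = (3 * (m : Int) + 1 + 1) + 1 := by ring
    push_cast [h1]
    rw [PySem.List.pyRange_one_succ_right (by positivity),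
      PySem.List.pyRange_one_succ_right (by positivity),
      PySem.List.pyRange_one_succ_right (by positivity)]
    simp only [List.map_append, ih, List.map_cons, List.map_nil]
    rw [pvEdges_succ]
    have e0 : PySem.Int.mod (3 * (m : Int)) 3 = 0 := by
      rw [pvModThree _ (by positivity)]; omega
    have e1 : PySem.Int.mod (3 * (m : Int) + 1) 3 = 1 := by
      rw [pvModThree _ (by positivity)]; omega
    have e2 : PySem.Int.mod (3 * (m : Int) + 1 + 1) 3 = 2 := by
      rw [pvModThree _ (by positivity)]; omega
    rw [e0, e1, e2]
    norm_num
    omega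

lemma pvSnapshot_eq (k : Nat) : pvSnapshot (k : Int) = (pvNodes (k+1), pvEdges (k+1)) := by
  have h : 3 * ((k : Int) + 1) = 3 * (((k+1 : Nat)) : Int) := by push_cast; ring
  show (PySem.List.pyRange 0 (3 * ((k : Int) + 1)) 1,
      (PySem.List.pyRange 0 (3 * ((k : Int) + 1)) 1).map
        (fun v => (v, if PySem.Int.mod v 3 ≠ 2 then v + 1 else v - 2))) = _
  rw [h, snapEdges, snapNodes]

lemma altB (m : Nat) : triangles_sequence___py_alt (m : Int) = pvSeq m := by
  unfold triangles_sequence___py_alt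
  rw [PySem.List.pyRange_one]
  simp only [Int.sub_zero, Int.toNat_natCast, zero_add, List.map_map, pvSeq]
  apply List.map_congr_left
  intro k _
  simp only [Function.comp, pvSnapshot_eq]

-- ===== VERDICT (by name: the statement is the Claim_ definition above) =====
theorem triangles_sequence___py_spec : Claim_equal_triangles_sequence___py := by
  intro n _
  unfold Spec_triangles_sequence___py
  have hA : triangles_sequence___py n =
      ((PySem.List.pyRange 0 n 1).foldl pvStep ([], [], [])).1 := rfl
  rcases Int.le_total n 0 with h | h
  · have h2 : triangles_sequence___py_alt n = [] := by
      unfold triangles_sequence___py_alt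
      simp [PySem.List.pyRange_one_eq_nil h]
    rw [hA, PySem.List.pyRange_one_eq_nil h, h2]
    rfl
  · have hn : n = ((n.toNat : Nat) : Int) := by omega
    rw [hA, hn, foldlA, altB]
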